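-- pv_equiv track=rewrite | github.com/DimitriosDiakoloukas/CodeJam2023FarewellRoundA | problem3.roundA.py | assign_integers
-- ===== SOURCE A (Python) =====
-- def remove_duplicates(lst):
--     seen = set()
--     result = []
--     for x in lst:
--         if x not in seen:
--             seen.add(x)
--             result.append(x)
--     return result
--
-- def assign_integers(colors):
--     assigned_ints = {}
--     assigned_colors = []
--     for color in colors:
--         if color in assigned_ints:
--             assigned_colors.append(color)
--         else:
--             assigned_ints[color] = len(assigned_ints) + 1
--             assigned_colors.append(color)
--     for i in range(1, len(assigned_colors)):
--         if assigned_ints[assigned_colors[i-1]] > assigned_ints[assigned_colors[i]]: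
--             return 'IMPOSSIBLE'
--     color_order = [(assigned_ints[color], color) for color in assigned_colors]
--     color_order.sort()
--     return ' '.join(remove_duplicates([str(color) for (_, color) in color_order]))
-- ===== SOURCE B (Python) =====
-- def assign_integers(colors):
--     runs = []
--     for c in colors:
--         if not runs or runs[-1] != c:
--             runs.append(c)
--     if len(set(runs)) != len(runs):
--         return 'IMPOSSIBLE'
--     return ' '.join(runs)
-- ===== Notes on version B (the rewrite author's own statement) =====
-- stated objective: simpler
-- what changed: B collapses the input into runs of consecutive equal colors in one pass and returns IMPOSSIBLE exactly when a run value repeats (set-size check), replacing A's rank dictionary, adjacent-rank validation loop, (rank,color) sort and order-preserving dedup.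
import Mathlib
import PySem

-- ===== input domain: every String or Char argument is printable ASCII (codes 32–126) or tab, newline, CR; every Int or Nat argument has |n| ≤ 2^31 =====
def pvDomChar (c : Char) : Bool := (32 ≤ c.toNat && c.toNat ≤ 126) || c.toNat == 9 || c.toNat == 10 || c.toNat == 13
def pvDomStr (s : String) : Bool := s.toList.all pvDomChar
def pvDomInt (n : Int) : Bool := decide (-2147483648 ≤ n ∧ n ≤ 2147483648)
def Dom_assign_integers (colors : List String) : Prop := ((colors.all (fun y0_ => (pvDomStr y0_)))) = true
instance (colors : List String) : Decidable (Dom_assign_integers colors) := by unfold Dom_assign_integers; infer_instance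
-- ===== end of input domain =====

-- B replaces A's rank dict, adjacent-rank check, (rank,color) sort and ordered dedup by one
-- run-collapsing pass plus a set-cardinality duplicate test (objective: simpler).

-- ===== PORT A =====
-- port of remove_duplicates: seen-set + result-list fold
def removeDuplicates (lst : List String) : List String :=
  (lst.foldl
    (fun (st : PySem.Set String × List String) x =>
      if st.1.contains x then st else (st.1.add x, st.2 ++ [x]))
    (PySem.Set.empty, [])).2

def assign_integers (colors : List String) : String :=
  let st := colors.foldl
    (fun (st : PySem.Dict String Int × List String) color =>
      if st.1.contains color then (st.1, st.2 ++ [color])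
      else (st.1.insert color ((st.1.size : Int) + 1), st.2 ++ [color]))
    (PySem.Dict.mk [], [])
  let assigned_ints := st.1
  let assigned_colors := st.2
  -- the dict lookups cannot raise KeyError (every element of assigned_colors is a key),
  -- so getD's defaults are unreachable
  if (PySem.List.pyRange 1 (assigned_colors.length : Int)).any (fun i =>
       decide (assigned_ints.getD (PySem.List.pyGetD assigned_colors (i - 1) "") 0 >
               assigned_ints.getD (PySem.List.pyGetD assigned_colors i "") 0))
  then "IMPOSSIBLE"
  else
    let color_order := assigned_colors.map (fun color => (assigned_ints.getD color 0, color))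
    -- Python's tuple comparison is lexicographic: sort with key toLex
    let sorted := PySem.List.sorted color_order (fun p => (toLex p : Lex (Int × String)))
    -- str(color) on a str is the identity
    PySem.Str.join " " (removeDuplicates (sorted.map (fun p => p.2)))

-- ===== PORT B =====
def assign_integers_alt (colors : List String) : String :=
  let runs := colors.foldl
    (fun runs c => if runs.getLast? ≠ some c then runs ++ [c] else runs) ([] : List String)
  if PySem.Set.len (PySem.Set.ofList runs) ≠ (runs.length : Int) then "IMPOSSIBLE"
  else PySem.Str.join " " runs

-- ===== PRECONDITION & SPEC =====
def Spec_assign_integers (colors : List String) (out : String) : Prop := out = assign_integers_alt colors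
instance (colors : List String) (out : String) : Decidable (Spec_assign_integers colors out) := by unfold Spec_assign_integers; infer_instance

-- ===== CLAIM (what is proved, stated in full; the proofs are below) =====
def Claim_equal_assign_integers : Prop := ∀ (colors : List String), Dom_assign_integers colors → Spec_assign_integers colors (assign_integers colors)

-- ===== LEMMAS AND PROOFS =====

-- run-collapsing with the value of the previous element (B's loop, recursively)
def collapseW : Option String → List String → List String
  | _, [] => []
  | last, c :: cs => if last = some c then collapseW last cs else c :: collapseW (some c) cs

-- the items list of A's rank dict: colors of d paired with ranks k, k+1, …
def rankedFrom : List String → Int → List (String × Int)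
  | [], _ => []
  | c :: t, k => (c, k) :: rankedFrom t (k + 1)

-- rank of a color as A's dict returns it
def rkOf (colors : List String) (c : String) : Int :=
  1 + (List.idxOf c (PySem.List.dedup colors) : Int)

theorem foldB_eq (cs : List String) : ∀ (acc : List String),
    cs.foldl (fun runs c => if runs.getLast? ≠ some c then runs ++ [c] else runs) acc
      = acc ++ collapseW acc.getLast? cs := by
  induction cs with
  | nil => intro acc; simp [collapseW]
  | cons c cs ih =>
    intro acc
    rw [List.foldl_cons]
    by_cases h : acc.getLast? = some c
    · rw [if_neg (not_not_intro h), ih, h]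
      simp [collapseW]
    · rw [if_pos h, ih]
      simp [collapseW, h, List.append_assoc]

theorem rankedFrom_append (x : String) : ∀ (l : List String) (k : Int),
    rankedFrom (l ++ [x]) k = rankedFrom l k ++ [(x, k + (l.length : Int))] := by
  intro l
  induction l with
  | nil => intro k; simp [rankedFrom]
  | cons c t ih =>
    intro k
    simp only [List.cons_append, rankedFrom, ih (k + 1), List.length_cons]
    have : k + 1 + (t.length : Int) = k + ((t.length + 1 : Nat) : Int) := by push_cast; ring
    rw [this]

theorem length_rankedFrom : ∀ (d : List String) (k : Int), (rankedFrom d k).length = d.length := by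
  intro d
  induction d with
  | nil => intro k; rfl
  | cons c t ih => intro k; simp [rankedFrom, ih]

theorem any_rankedFrom (x : String) : ∀ (d : List String) (k : Int),
    ((rankedFrom d k).any fun p => p.1 == x) = decide (x ∈ d) := by
  intro d
  induction d with
  | nil => intro k; rfl
  | cons c t ih =>
    intro k
    rcases eq_or_ne c x with h | h
    · simp [rankedFrom, List.any_cons, h]
    · simp [rankedFrom, List.any_cons, ih, h, Ne.symm h]

theorem find?_rankedFrom (c : String) : ∀ (d : List String) (k : Int), c ∈ d →
    (PySem.Dict.mk (rankedFrom d k)).get? c = some (k + (List.idxOf c d : Int)) := by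
  intro d
  induction d with
  | nil => intro k h; cases h
  | cons a t ih =>
    intro k h
    rw [rankedFrom, PySem.Dict.get?_mk_cons]
    by_cases hac : a = c
    · subst hac; simp
    · rw [if_neg (by simpa using hac)]
      have hct : c ∈ t := by
        rcases List.mem_cons.1 h with h' | h'
        · exact absurd h'.symm hac
        · exact h'
      rw [ih (k + 1) hct, List.idxOf_cons_ne _ (by simpa using hac)]
      refine congrArg _ ?_
      push_cast; ring

theorem foldA_eq (cs : List String) :
    cs.foldl
      (fun (st : PySem.Dict String Int × List String) color =>
        if st.1.contains color then (st.1, st.2 ++ [color])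
        else (st.1.insert color ((st.1.size : Int) + 1), st.2 ++ [color]))
      (PySem.Dict.mk [], [])
    = (PySem.Dict.mk (rankedFrom (PySem.List.dedup cs) 1), cs) := by
  induction cs using List.reverseRecOn with
  | nil => rfl
  | append_singleton xs x ih =>
    rw [List.foldl_append, ih, List.foldl_cons, List.foldl_nil]
    have hc : (PySem.Dict.mk (rankedFrom (PySem.List.dedup xs) 1)).contains x
        = decide (x ∈ xs) := by
      rw [PySem.Dict.contains_mk, any_rankedFrom]
      simp
    have hded : PySem.List.dedup (xs ++ [x])
        = if x ∈ xs then PySem.List.dedup xs else PySem.List.dedup xs ++ [x] := by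
      rw [PySem.List.dedup_eq_ofList, PySem.List.dedup_eq_ofList,
        PySem.Set.ofList_append_singleton, PySem.Set.add_eq_ite]
      simp [PySem.Set.mem_ofList]
    by_cases hx : x ∈ xs
    · rw [hc, hded, if_pos hx]
      simp [hx]
    · rw [hc, hded, if_neg hx]
      simp only [hx, decide_false, Bool.false_eq_true, if_false]
      refine Prod.ext ?_ rfl
      refine PySem.Dict.ext ?_
      rw [PySem.Dict.items_insert_of_not_contains _ _ (by rw [hc]; simp [hx]),
        rankedFrom_append]
      simp only [PySem.Dict.size, length_rankedFrom]
      have : ((PySem.List.dedup xs).length : Int) + 1 = 1 + ((PySem.List.dedup xs).length : Int) := by ring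
      rw [this]

theorem getD_rankedFrom (d : List String) (k : Int) (c : String) (hc : c ∈ d) :
    (PySem.Dict.mk (rankedFrom d k)).getD c 0 = k + (List.idxOf c d : Int) := by
  rw [PySem.Dict.getD, find?_rankedFrom c d k hc]
  rfl

theorem rd_aux (l : List String) : ∀ (s : List String),
    l.foldl
      (fun (st : PySem.Set String × List String) x =>
        if st.1.contains x then st else (st.1.add x, st.2 ++ [x])) (s, s)
    = (l.foldl PySem.Set.add s, l.foldl PySem.Set.add s) := by
  induction l with
  | nil => intro s; rfl
  | cons c t ih =>
    intro s
    rw [List.foldl_cons, List.foldl_cons]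
    have hstep : (if PySem.Set.contains (s, s).1 c then ((s, s) : PySem.Set String × List String)
        else (PySem.Set.add (s, s).1 c, (s, s).2 ++ [c]))
        = (PySem.Set.add s c, PySem.Set.add s c) := by
      show (if PySem.Set.contains s c then ((s : PySem.Set String), s)
        else (PySem.Set.add s c, s ++ [c])) = (PySem.Set.add s c, PySem.Set.add s c)
      by_cases h : PySem.Set.contains s c
      · rw [if_pos h]
        rw [show PySem.Set.add s c = s from by rw [PySem.Set.add, if_pos h]]
      · rw [if_neg h]
        rw [show PySem.Set.add s c = s ++ [c] from by rw [PySem.Set.add, if_neg h]]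
    rw [hstep]
    exact ih (PySem.Set.add s c)

theorem removeDuplicates_eq (l : List String) : removeDuplicates l = PySem.List.dedup l := by
  rw [removeDuplicates, PySem.List.dedup_eq_ofList, PySem.Set.ofList]
  rw [show ((PySem.Set.empty, []) : PySem.Set String × List String)
      = (([] : List String), ([] : List String)) from rfl, rd_aux l []]
  rfl

theorem rk_inj (colors : List String) {a b : String} (ha : a ∈ colors) (hb : b ∈ colors)
    (h : rkOf colors a = rkOf colors b) : a = b := by
  have ha' : a ∈ PySem.List.dedup colors := (PySem.List.mem_dedup _ _).2 ha
  have hb' : b ∈ PySem.List.dedup colors := (PySem.List.mem_dedup _ _).2 hb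
  have hidx : List.idxOf a (PySem.List.dedup colors) = List.idxOf b (PySem.List.dedup colors) := by
    have := h
    unfold rkOf at this
    omega
  exact (List.idxOf_inj ha').1 hidx

theorem rk_mono (p r : List String) {x y : String} (hx : x ∈ p) (hyp : y ∉ p) (_hyr : y ∈ r) :
    rkOf (p ++ r) x < rkOf (p ++ r) y := by
  unfold rkOf
  have hd : PySem.List.dedup (p ++ r)
      = PySem.Set.ofList p ++ (PySem.Set.ofList r).filter (fun z => !(PySem.Set.ofList p).contains z) := by
    rw [PySem.List.dedup_eq_ofList, PySem.Set.ofList_append, PySem.Set.update_eq_append_filter]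
  have hxp : x ∈ PySem.Set.ofList p := (PySem.Set.mem_ofList _ _).2 hx
  have hyp' : y ∉ PySem.Set.ofList p := fun h => hyp ((PySem.Set.mem_ofList _ _).1 h)
  have hix : List.idxOf x (PySem.List.dedup (p ++ r)) < (PySem.Set.ofList p).length := by
    rw [hd, List.idxOf_append, if_pos hxp]
    exact List.idxOf_lt_length_of_mem hxp
  have hiy : (PySem.Set.ofList p).length ≤ List.idxOf y (PySem.List.dedup (p ++ r)) := by
    rw [hd, List.idxOf_append, if_neg hyp']
    omega
  omega

theorem collapseW_sublist : ∀ (cs : List String) (l : Option String), (collapseW l cs).Sublist cs := by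
  intro cs
  induction cs with
  | nil => intro l; simp [collapseW]
  | cons c cs ih =>
    intro l
    rw [collapseW]
    split
    · exact (ih l).cons c
    · exact (ih (some c)).cons₂ c

theorem collapseW_ne : ∀ (cs : List String) (l : Option String),
    List.IsChain (· ≠ ·) (collapseW l cs) ∧ ∀ a, l = some a → (collapseW l cs).head? ≠ some a := by
  intro cs
  induction cs with
  | nil => intro l; exact ⟨by simp [collapseW], by simp [collapseW]⟩
  | cons c cs ih =>
    intro l
    rw [collapseW]
    split
    · rename_i h
      subst h
      exact ih (some c)
    · rename_i h
      refine ⟨?_, ?_⟩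
      · rw [List.isChain_cons]
        refine ⟨?_, (ih (some c)).1⟩
        intro y hy hcy
        subst hcy
        exact (ih (some c)).2 c rfl (by
          cases hh : (collapseW (some c) cs).head? with
          | none => rw [hh] at hy; cases hy
          | some z => rw [hh] at hy; simp at hy; rw [hy])
      · intro a hla
        subst hla
        simp only [List.head?_cons, ne_eq, Option.some.injEq]
        intro hca
        exact h (by rw [hca])

theorem getLast?_cons_or (c : String) (u : List String) (l : Option String) :
    (c :: u).getLast?.or l = u.getLast?.or (some c) := by
  cases u with
  | nil => rfl
  | cons x xs =>
    rw [List.getLast?_cons_cons]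
    rw [List.getLast?_eq_some_getLast (l := x :: xs) (by simp)]
    rfl

theorem collapseW_append (v : List String) : ∀ (u : List String) (l : Option String),
    collapseW l (u ++ v) = collapseW l u ++ collapseW (u.getLast?.or l) v := by
  intro u
  induction u with
  | nil => intro l; simp [collapseW]
  | cons c u' ih =>
    intro l
    rw [List.cons_append, collapseW, collapseW, getLast?_cons_or]
    split
    · rename_i h
      subst h
      rw [ih (some c)]
    · rw [ih (some c), List.cons_append]

theorem mem_collapseW : ∀ (cs : List String) (l : Option String) (x : String),
    x ∈ cs → some x = l ∨ x ∈ collapseW l cs := by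
  intro cs
  induction cs with
  | nil => intro l x h; cases h
  | cons c cs ih =>
    intro l x hx
    rw [collapseW]
    split
    · rename_i h
      subst h
      rcases List.mem_cons.1 hx with h' | h'
      · left; rw [h']
      · exact ih (some c) x h'
    · rcases List.mem_cons.1 hx with h' | h'
      · right; rw [h']; exact List.mem_cons_self
      · rcases ih (some c) x h' with h'' | h''
        · right
          rw [show x = c from by simpa using h'']
          exact List.mem_cons_self
        · right; exact List.mem_cons_of_mem _ h''

-- Chain of nondecreasing ranks implies the runs are distinct
theorem nodup_collapse_of_chain (colors : List String)
    (h : List.IsChain (fun a b => rkOf colors a ≤ rkOf colors b) colors) :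
    (collapseW none colors).Nodup := by
  haveI : Trans (fun a b : String => rkOf colors a ≤ rkOf colors b)
      (fun a b : String => rkOf colors a ≤ rkOf colors b)
      (fun a b : String => rkOf colors a ≤ rkOf colors b) := ⟨fun h1 h2 => le_trans h1 h2⟩
  haveI : Trans (fun a b : String => rkOf colors a < rkOf colors b)
      (fun a b : String => rkOf colors a < rkOf colors b)
      (fun a b : String => rkOf colors a < rkOf colors b) := ⟨fun h1 h2 => lt_trans h1 h2⟩
  have hp : List.Pairwise (fun a b => rkOf colors a ≤ rkOf colors b) colors := h.pairwise
  have hps := List.Pairwise.sublist (collapseW_sublist colors none) hp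
  have hmem : ∀ x ∈ collapseW none colors, x ∈ colors :=
    fun x hx => (collapseW_sublist colors none).mem hx
  have hchain_le := hps.isChain
  have hne := (collapseW_ne colors none).1
  have hstrict : List.IsChain (fun a b => rkOf colors a < rkOf colors b) (collapseW none colors) := by
    rw [List.isChain_iff_getElem] at hchain_le hne ⊢
    intro i hi
    refine lt_of_le_of_ne (hchain_le i hi) (fun heq => hne i hi ?_)
    exact rk_inj colors (hmem _ (List.getElem_mem _)) (hmem _ (List.getElem_mem _)) heq
  exact hstrict.pairwise.imp (fun hlt heq => by subst heq; exact lt_irrefl _ hlt)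

-- distinct runs imply the chain of nondecreasing ranks
theorem chain_of_nodup_collapse (colors : List String)
    (h : (collapseW none colors).Nodup) :
    List.IsChain (fun a b => rkOf colors a ≤ rkOf colors b) colors := by
  rw [List.isChain_iff_getElem]
  intro i hi
  by_contra hgt
  push Not at hgt
  set p := colors.take (i + 1) with hp
  set r := colors.drop (i + 1) with hr
  have hcol : p ++ r = colors := List.take_append_drop _ _
  have hplen : p.length = i + 1 := by rw [hp, List.length_take]; omega
  have ha_mem : colors[i] ∈ p := by
    have hip : i < p.length := by omega
    have : p[i]'hip = colors[i] := List.getElem_take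
    rw [← this]
    exact List.getElem_mem _
  have hrb : r = colors[i + 1] :: colors.drop (i + 2) := by
    rw [hr, List.drop_eq_getElem_cons hi]
  have hab : colors[i] ≠ colors[i + 1] := fun he => by rw [he] at hgt; exact lt_irrefl _ hgt
  by_cases hbp : colors[i + 1] ∈ p
  · have hruns : collapseW none colors
        = collapseW none p ++ collapseW (p.getLast?.or none) r := by
      conv_lhs => rw [← hcol]
      rw [collapseW_append]
    have hpl : p.getLast? = some colors[i] := by
      rw [List.getLast?_eq_getElem?, hplen]
      simp only [Nat.add_sub_cancel]
      rw [List.getElem?_eq_getElem (by omega)]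
      have hip : i < p.length := by omega
      have : p[i]'hip = colors[i] := List.getElem_take
      rw [this]
    rw [hpl, hrb] at hruns
    rw [show (Option.or (some colors[i]) none) = some colors[i] from rfl] at hruns
    rw [collapseW, if_neg (by simpa using hab)] at hruns
    have hbmem : colors[i + 1] ∈ collapseW none p := by
      rcases mem_collapseW p none _ hbp with h' | h'
      · cases h'
      · exact h'
    rw [hruns] at h
    rcases List.nodup_append.1 h with ⟨_, _, hdisj⟩
    exact hdisj _ hbmem _ List.mem_cons_self rfl
  · have hbr : colors[i + 1] ∈ r := by rw [hrb]; exact List.mem_cons_self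
    have := rk_mono p r ha_mem hbp hbr
    rw [hcol] at this
    omega

theorem collapseW_eq_dedup_aux : ∀ (cs : List String) (a : String),
    (collapseW (some a) cs).Nodup → a ∉ collapseW (some a) cs →
    collapseW (some a) cs = PySem.Set.discard (PySem.List.dedup cs) a := by
  intro cs
  induction cs with
  | nil =>
    intro a _ _
    simp [collapseW, PySem.List.dedup_eq_ofList, PySem.Set.ofList_nil, PySem.Set.discard]
  | cons c cs' ih =>
    intro a hnd hna
    have hded : PySem.List.dedup (c :: cs') = c :: PySem.Set.discard (PySem.List.dedup cs') c := by
      rw [PySem.List.dedup_eq_ofList, PySem.Set.ofList_cons, ← PySem.List.dedup_eq_ofList]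
    by_cases hac : a = c
    · subst hac
      have hL : collapseW (some a) (a :: cs') = collapseW (some a) cs' := by
        rw [collapseW, if_pos rfl]
      rw [hL] at hnd hna ⊢
      rw [ih a hnd hna, hded]
      simp [PySem.Set.discard, List.filter_filter]
    · have hL : collapseW (some a) (c :: cs') = c :: collapseW (some c) cs' := by
        rw [collapseW, if_neg (by simpa using hac)]
      rw [hL] at hnd hna ⊢
      rcases List.nodup_cons.1 hnd with ⟨hcY, hY⟩
      have haY : a ∉ collapseW (some c) cs' := fun h' => hna (List.mem_cons_of_mem _ h')
      have hca : ¬(c = a) := fun h' => hac h'.symm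
      rw [hded]
      rw [show PySem.Set.discard (c :: PySem.Set.discard (PySem.List.dedup cs') c) a
          = c :: PySem.Set.discard (PySem.Set.discard (PySem.List.dedup cs') c) a from by
        simp [PySem.Set.discard, hca]]
      rw [← ih c hY hcY]
      rw [show PySem.Set.discard (collapseW (some c) cs') a = collapseW (some c) cs' from by
        simp only [PySem.Set.discard]
        refine List.filter_eq_self.2 (fun b hb => ?_)
        simp only [Bool.not_eq_true', beq_eq_false_iff_ne, ne_eq]
        exact fun hba => haY (hba ▸ hb)]

theorem collapseW_eq_dedup (colors : List String) (h : (collapseW none colors).Nodup) :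
    collapseW none colors = PySem.List.dedup colors := by
  cases colors with
  | nil => rfl
  | cons a cs =>
    have hL : collapseW none (a :: cs) = a :: collapseW (some a) cs := by
      rw [collapseW, if_neg (by simp)]
    rw [hL] at h ⊢
    rcases List.nodup_cons.1 h with ⟨haY, hY⟩
    rw [collapseW_eq_dedup_aux cs a hY haY]
    conv_rhs => rw [PySem.List.dedup_eq_ofList, PySem.Set.ofList_cons, ← PySem.List.dedup_eq_ofList]

theorem nodup_of_ofList_length : ∀ (l : List String),
    (PySem.Set.ofList l).length = l.length → l.Nodup := by
  intro l
  induction l with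
  | nil => intro _; exact List.nodup_nil
  | cons x xs ih =>
    intro h
    rw [PySem.Set.ofList_cons] at h
    simp only [List.length_cons] at h
    have hd : (PySem.Set.discard (PySem.Set.ofList xs) x).length ≤ (PySem.Set.ofList xs).length :=
      List.length_filter_le _ _
    have hof := PySem.Set.length_ofList_le xs
    have hlen : (PySem.Set.ofList xs).length = xs.length := by omega
    have hfull : (PySem.Set.discard (PySem.Set.ofList xs) x).length = (PySem.Set.ofList xs).length := by
      omega
    have hxnot : x ∉ PySem.Set.ofList xs := by
      intro hx
      have hall := List.length_filter_eq_length_iff.1 hfull x hx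
      simp at hall
    exact List.nodup_cons.2 ⟨fun hx => hxnot ((PySem.Set.mem_ofList _ _).2 hx), ih hlen⟩

theorem rk_getD (colors : List String) (x : String) (hx : x ∈ colors) :
    (PySem.Dict.mk (rankedFrom (PySem.List.dedup colors) 1)).getD x 0 = rkOf colors x := by
  rw [getD_rankedFrom _ _ _ ((PySem.List.mem_dedup _ _).2 hx), rkOf]

theorem anyCond_iff (colors : List String) :
    ((PySem.List.pyRange 1 (colors.length : Int)).any (fun i =>
        decide ((PySem.Dict.mk (rankedFrom (PySem.List.dedup colors) 1)).getD
                  (PySem.List.pyGetD colors (i - 1) "") 0 >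
                (PySem.Dict.mk (rankedFrom (PySem.List.dedup colors) 1)).getD
                  (PySem.List.pyGetD colors i "") 0)) = true)
    ↔ ¬ List.IsChain (fun a b => rkOf colors a ≤ rkOf colors b) colors := by
  rw [List.any_eq_true]
  constructor
  · rintro ⟨i, hmem, hcond⟩ hchain
    rcases PySem.List.mem_pyRange_one.1 hmem with ⟨h1, h2⟩
    have hk0 : (0 : Int) ≤ i - 1 := by omega
    set k := (i - 1).toNat with hk
    have hk1 : i - 1 = (k : Int) := by omega
    have hk2 : i = ((k + 1 : Nat) : Int) := by push_cast; omega
    have hklen : k + 1 < colors.length := by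
      have : i < (colors.length : Int) := h2
      omega
    rw [hk1, hk2, PySem.List.pyGetD_natCast, PySem.List.pyGetD_natCast,
      List.getD_eq_getElem _ _ (by omega : k < colors.length),
      List.getD_eq_getElem _ _ hklen] at hcond
    rw [rk_getD _ _ (List.getElem_mem _), rk_getD _ _ (List.getElem_mem _)] at hcond
    have hc := of_decide_eq_true hcond
    have := (List.isChain_iff_getElem.1 hchain) k hklen
    omega
  · intro hnot
    rw [List.isChain_iff_getElem] at hnot
    push Not at hnot
    rcases hnot with ⟨k, hk, hlt⟩
    refine ⟨((k + 1 : Nat) : Int), PySem.List.mem_pyRange_one.2 ⟨by omega, by exact_mod_cast hk⟩, ?_⟩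
    have hk1 : ((k + 1 : Nat) : Int) - 1 = (k : Int) := by push_cast; omega
    rw [hk1, PySem.List.pyGetD_natCast, PySem.List.pyGetD_natCast,
      List.getD_eq_getElem _ _ (by omega : k < colors.length),
      List.getD_eq_getElem _ _ hk]
    rw [rk_getD _ _ (List.getElem_mem _), rk_getD _ _ (List.getElem_mem _)]
    exact decide_eq_true hlt

-- ===== VERDICT (by name: the statement is the Claim_ definition above) =====
theorem assign_integers_spec : Claim_equal_assign_integers := by
  intro colors _
  unfold Spec_assign_integers
  simp only [assign_integers, assign_integers_alt, foldA_eq, foldB_eq, List.nil_append,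
    List.getLast?_nil]
  by_cases hch : List.IsChain (fun a b => rkOf colors a ≤ rkOf colors b) colors
  · have hAny : ¬(((PySem.List.pyRange 1 (colors.length : Int)).any (fun i =>
        decide ((PySem.Dict.mk (rankedFrom (PySem.List.dedup colors) 1)).getD
                  (PySem.List.pyGetD colors (i - 1) "") 0 >
                (PySem.Dict.mk (rankedFrom (PySem.List.dedup colors) 1)).getD
                  (PySem.List.pyGetD colors i "") 0))) = true) :=
      fun h => (anyCond_iff colors).1 h hch
    have hnodup := nodup_collapse_of_chain colors hch
    have hrd := collapseW_eq_dedup colors hnodup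
    have hself := PySem.Set.ofList_eq_self_of_nodup _ hnodup
    rw [if_neg hAny,
      if_neg (not_not_intro (by rw [hself, PySem.Set.len_eq] :
        PySem.Set.len (PySem.Set.ofList (collapseW none colors))
          = ((collapseW none colors).length : Int)))]
    haveI : Trans (fun a b : String => rkOf colors a ≤ rkOf colors b)
        (fun a b : String => rkOf colors a ≤ rkOf colors b)
        (fun a b : String => rkOf colors a ≤ rkOf colors b) := ⟨fun h1 h2 => le_trans h1 h2⟩
    have hpw : List.Pairwise (fun a b : String =>
        (toLex ((PySem.Dict.mk (rankedFrom (PySem.List.dedup colors) 1)).getD a 0, a)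
          : Lex (Int × String))
        ≤ toLex ((PySem.Dict.mk (rankedFrom (PySem.List.dedup colors) 1)).getD b 0, b))
        colors := by
      refine List.Pairwise.imp_of_mem (fun {a b} ha hb hr => ?_) hch.pairwise
      rw [rk_getD _ _ ha, rk_getD _ _ hb]
      rcases lt_or_eq_of_le hr with hlt | heq
      · exact Prod.Lex.le_iff.2 (Or.inl hlt)
      · exact Prod.Lex.le_iff.2 (Or.inr ⟨heq, by rw [rk_inj colors ha hb heq]⟩)
    rw [PySem.List.sorted_eq_self_of_pairwise _ _ (List.pairwise_map.2 hpw)]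
    rw [List.map_map]
    rw [show ((fun p : Int × String => p.2) ∘ fun color =>
        ((PySem.Dict.mk (rankedFrom (PySem.List.dedup colors) 1)).getD color 0, color))
        = fun c => c from rfl]
    rw [List.map_id', removeDuplicates_eq, hrd]
  · rw [if_pos ((anyCond_iff colors).2 hch)]
    have hcond : PySem.Set.len (PySem.Set.ofList (collapseW none colors))
        ≠ ((collapseW none colors).length : Int) := by
      intro heq
      rw [PySem.Set.len_eq, Int.natCast_inj] at heq
      exact hch (chain_of_nodup_collapse colors (nodup_of_ofList_length _ heq))
    rw [if_pos hcond]
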